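-- pv_equiv track=rewrite | github.com/shimmybalsam/Intro_ex7 | ex7.py | no_repetition_list_with_prefix
-- ===== SOURCE A (Python) =====
-- def no_repetition_list_with_prefix(prefix,char_list,n,no_repetition_list):
--     """Receives a list of character and a list of sequences and Returns the
--     list of sequences once it only has 'n' long sequences starting with a given
--      prefix, using only letters from the characters list, and so that no
--      character letter will show up in each sequence more than once."""
--     if len(prefix) == n:
--         no_repetition_list.append(prefix)
--         return no_repetition_list
--     else:
--         for letter in char_list:
--             if letter not in prefix:
--                 no_repetition_list_with_prefix(prefix+letter,char_list,n,no_repetition_list)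
--         return no_repetition_list
-- ===== SOURCE B (Python) =====
-- def no_repetition_list_with_prefix(prefix, char_list, n, no_repetition_list):
--     """Iterative DFS with an explicit stack instead of recursion; extensions are
--     pushed in reversed char_list order so the LIFO stack yields the same output
--     order. Mutates and returns the same list, like the original."""
--     stack = [prefix]
--     while stack:
--         current = stack.pop()
--         if len(current) == n:
--             no_repetition_list.append(current)
--         else:
--             for letter in reversed(char_list):
--                 if letter not in current:
--                     stack.append(current + letter)
--     return no_repetition_list
-- ===== Notes on version B (the rewrite author's own statement) =====
-- stated objective: alternative
-- what changed: B replaces A's recursion (which threads the output list through recursive calls) with an iterative depth-first search over an explicit stack of pending prefixes, pushing extensions in reversed char_list order so the LIFO stack reproduces A's output order.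
import Mathlib
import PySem

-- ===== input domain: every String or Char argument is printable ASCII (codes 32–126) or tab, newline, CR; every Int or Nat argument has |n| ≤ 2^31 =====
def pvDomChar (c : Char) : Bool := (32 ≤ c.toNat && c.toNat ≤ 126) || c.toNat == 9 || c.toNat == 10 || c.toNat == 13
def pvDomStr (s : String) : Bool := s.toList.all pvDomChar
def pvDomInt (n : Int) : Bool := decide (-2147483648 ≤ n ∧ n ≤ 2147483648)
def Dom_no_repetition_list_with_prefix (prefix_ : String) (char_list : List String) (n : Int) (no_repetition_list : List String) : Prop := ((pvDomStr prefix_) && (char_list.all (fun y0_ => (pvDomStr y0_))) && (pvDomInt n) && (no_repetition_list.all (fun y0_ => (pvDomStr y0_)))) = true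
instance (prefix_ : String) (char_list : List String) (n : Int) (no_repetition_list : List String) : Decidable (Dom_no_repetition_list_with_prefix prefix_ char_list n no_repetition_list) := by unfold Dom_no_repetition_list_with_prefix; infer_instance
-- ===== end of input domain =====

-- B replaces A's recursion by an iterative DFS over an explicit stack of pending prefixes
-- (alternative decomposition, same search order and cost). Both A and B mutate the passed
-- list in Python (append); the Lean claim is about the return value.

-- number of letters of `cl` that are not yet substrings of `p`; termination measure of both ports
def nrFree (cl : List String) (p : String) : Nat :=
  (cl.filter (fun l => !PySem.Str.isIn l p)).length

-- appending a fresh letter strictly shrinks the set of fresh letters (cited by both ports' decreasing_by)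
theorem nrFree_lt (cl : List String) (p l : String) (hl : l ∈ cl)
    (hfree : PySem.Str.isIn l p = false) : nrFree cl (p ++ l) < nrFree cl p := by
  unfold nrFree
  have key : ∀ x : String, PySem.Str.isIn x p = true → PySem.Str.isIn x (p ++ l) = true := by
    intro a ha
    rw [PySem.Str.isIn_iff_infix] at ha ⊢
    simp only [String.toList_append]
    exact ha.trans ((List.prefix_append p.toList l.toList).isInfix)
  have hsub : List.Sublist (cl.filter (fun x => !PySem.Str.isIn x (p ++ l)))
      (cl.filter (fun x => !PySem.Str.isIn x p)) := by
    refine List.monotone_filter_right cl ?_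
    intro a ha
    simp only [Bool.not_eq_true'] at ha ⊢
    exact Bool.eq_false_iff.mpr (fun hp => Bool.eq_false_iff.mp ha (key a hp))
  rcases Nat.lt_or_ge (cl.filter (fun x => !PySem.Str.isIn x (p ++ l))).length
      (cl.filter (fun x => !PySem.Str.isIn x p)).length with h | h
  · exact h
  · exfalso
    have heq := hsub.eq_of_length (Nat.le_antisymm hsub.length_le h)
    have hmem : l ∈ cl.filter (fun x => !PySem.Str.isIn x p) := by
      rw [List.mem_filter]
      exact ⟨hl, by rw [hfree]; rfl⟩
    rw [← heq, List.mem_filter] at hmem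
    have hin : PySem.Str.isIn l (p ++ l) = true := by
      rw [PySem.Str.isIn_iff_infix]
      simp only [String.toList_append]
      exact (List.suffix_append p.toList l.toList).isInfix
    rw [hin] at hmem
    exact Bool.false_ne_true hmem.2

-- ===== PORT A =====
-- the for-loop over char_list becomes the inner recursion nrGoA over the remaining letters
-- (rest, with its membership evidence); the output list is threaded as the accumulator, as in A
mutual
def no_repetition_list_with_prefix (prefix_ : String) (char_list : List String) (n : Int) (no_repetition_list : List String) : List String :=
  if PySem.Str.len prefix_ = n then
    no_repetition_list ++ [prefix_]
  else
    nrGoA prefix_ char_list n char_list (fun _ h => h) no_repetition_list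
termination_by (nrFree char_list prefix_, char_list.length + 1)
decreasing_by exact Prod.Lex.right _ (Nat.lt_succ_self _)

def nrGoA (prefix_ : String) (char_list : List String) (n : Int) (rest : List String)
    (hrest : ∀ x, x ∈ rest → x ∈ char_list) (acc : List String) : List String :=
  match rest with
  | [] => acc
  | letter :: ls =>
    if h : PySem.Str.isIn letter prefix_ then
      nrGoA prefix_ char_list n ls (fun x hx => hrest x (List.mem_cons_of_mem _ hx)) acc
    else
      nrGoA prefix_ char_list n ls (fun x hx => hrest x (List.mem_cons_of_mem _ hx))
        (no_repetition_list_with_prefix (prefix_ ++ letter) char_list n acc)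
termination_by (nrFree char_list prefix_, rest.length)
decreasing_by
  · exact Prod.Lex.right _ (Nat.lt_succ_self _)
  · exact Prod.Lex.left _ _ (nrFree_lt char_list prefix_ letter
      (hrest letter List.mem_cons_self) (Bool.eq_false_iff.mpr h))
  · exact Prod.Lex.right _ (Nat.lt_succ_self _)
end

-- ===== PORT B =====
-- the stack's top is the list head; pushing the extensions in reversed char_list order and
-- then popping one by one is exactly prepending them in char_list order, so one iteration
-- of Source B's while-loop pops the head and prepends the fresh extensions in char_list order.
-- Termination measure of the stack: each pending prefix p is charged (|cl|+1)^(free p + 1).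
def nrStackMeasure (cl : List String) (st : List String) : Nat :=
  (st.map (fun p => (cl.length + 1) ^ (nrFree cl p + 1))).sum

-- popping p and pushing its at most |cl| extensions (each strictly fewer free letters)
-- strictly decreases the stack measure (cited by nrLoop's decreasing_by)
theorem nrStackMeasure_children_lt (cl : List String) (p : String) :
    nrStackMeasure cl ((cl.filter (fun l => !PySem.Str.isIn l p)).map (fun l => p ++ l))
      < (cl.length + 1) ^ (nrFree cl p + 1) := by
  unfold nrStackMeasure
  set F := cl.filter (fun l => !PySem.Str.isIn l p) with hF
  have hbound : ∀ x ∈ (F.map (fun l => p ++ l)).map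
      (fun q => (cl.length + 1) ^ (nrFree cl q + 1)),
      x ≤ (cl.length + 1) ^ (nrFree cl p) := by
    intro x hx
    simp only [List.map_map, List.mem_map, Function.comp] at hx
    obtain ⟨l, hl, rfl⟩ := hx
    rw [hF, List.mem_filter] at hl
    have hlt := nrFree_lt cl p l hl.1 (by simpa using hl.2)
    exact Nat.pow_le_pow_right (Nat.succ_le_succ (Nat.zero_le _)) (by omega)
  have hsum := List.sum_le_card_nsmul _ _ hbound
  simp only [List.length_map, smul_eq_mul] at hsum
  have hlen : F.length ≤ cl.length := by rw [hF]; exact List.length_filter_le _ _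
  have hpos : 0 < (cl.length + 1) ^ (nrFree cl p) :=
    Nat.pow_pos (Nat.succ_pos _)
  calc ((F.map (fun l => p ++ l)).map (fun q => (cl.length + 1) ^ (nrFree cl q + 1))).sum
      ≤ F.length * (cl.length + 1) ^ (nrFree cl p) := hsum
    _ ≤ cl.length * (cl.length + 1) ^ (nrFree cl p) := Nat.mul_le_mul_right _ hlen
    _ < (cl.length + 1) * (cl.length + 1) ^ (nrFree cl p) := by
        exact Nat.mul_lt_mul_of_lt_of_le (Nat.lt_succ_self _) (Nat.le_refl _) hpos
    _ = (cl.length + 1) ^ (nrFree cl p + 1) := by ring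

-- Source B's while-loop: state = (stack, output list)
def nrLoop (char_list : List String) (n : Int) (stack : List String) (out : List String) : List String :=
  match stack with
  | [] => out
  | p :: rest =>
    if PySem.Str.len p = n then
      nrLoop char_list n rest (out ++ [p])
    else
      nrLoop char_list n
        ((char_list.filter (fun l => !PySem.Str.isIn l p)).map (fun l => p ++ l) ++ rest) out
termination_by nrStackMeasure char_list stack
decreasing_by
  · simp only [nrStackMeasure, List.map_cons, List.sum_cons]
    have : 0 < (char_list.length + 1) ^ (nrFree char_list p + 1) :=
      Nat.pow_pos (Nat.succ_pos _)
    omega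
  · have h := nrStackMeasure_children_lt char_list p
    unfold nrStackMeasure at h
    simp only [nrStackMeasure, List.map_cons, List.sum_cons, List.map_append, List.sum_append]
    simp only [List.map_map, Function.comp_def] at h ⊢
    simp at h ⊢
    simp only [List.unattach_filter, List.unattach_attach] at h ⊢
    omega

def no_repetition_list_with_prefix_alt (prefix_ : String) (char_list : List String) (n : Int) (no_repetition_list : List String) : List String :=
  nrLoop char_list n [prefix_] no_repetition_list

-- ===== PRECONDITION & SPEC =====
def Spec_no_repetition_list_with_prefix (prefix_ : String) (char_list : List String) (n : Int) (no_repetition_list : List String) (out : List String) : Prop := out = no_repetition_list_with_prefix_alt prefix_ char_list n no_repetition_list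
instance (prefix_ : String) (char_list : List String) (n : Int) (no_repetition_list : List String) (out : List String) : Decidable (Spec_no_repetition_list_with_prefix prefix_ char_list n no_repetition_list out) := by unfold Spec_no_repetition_list_with_prefix; infer_instance

-- ===== CLAIM (what is proved, stated in full; the proofs are below) =====
def Claim_equal_no_repetition_list_with_prefix : Prop := ∀ (prefix_ : String) (char_list : List String) (n : Int) (no_repetition_list : List String), Dom_no_repetition_list_with_prefix prefix_ char_list n no_repetition_list → Spec_no_repetition_list_with_prefix prefix_ char_list n no_repetition_list (no_repetition_list_with_prefix prefix_ char_list n no_repetition_list)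

-- ===== LEMMAS AND PROOFS =====

-- proof helper: the pure list of completions of a prefix (used only by the proofs below)
def nrComps (char_list : List String) (n : Int) (p : String) : List String :=
  if PySem.Str.len p = n then
    [p]
  else
    (char_list.filter (fun letter => !PySem.Str.isIn letter p)).attach.flatMap
      (fun letter => nrComps char_list n (p ++ letter.1))
termination_by nrFree char_list p
decreasing_by
  have h2 := letter.2
  rw [List.mem_filter] at h2
  exact nrFree_lt char_list p letter.1 h2.1 (by simpa using h2.2)

-- A's threaded recursion appends exactly the pure completion list
theorem nrA_eq_append (fc : Nat) (char_list : List String) (n : Int) :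
    ∀ (prefix_ : String), nrFree char_list prefix_ = fc →
      (∀ acc, no_repetition_list_with_prefix prefix_ char_list n acc
          = acc ++ nrComps char_list n prefix_)
      ∧ (∀ (rest : List String) (hrest : ∀ x, x ∈ rest → x ∈ char_list) acc,
          nrGoA prefix_ char_list n rest hrest acc
            = acc ++ (rest.filter (fun letter => !PySem.Str.isIn letter prefix_)).flatMap
                (fun letter => nrComps char_list n (prefix_ ++ letter))) := by
  induction fc using Nat.strong_induction_on with
  | _ fc ih =>
    intro prefix_ hfc
    have goA : ∀ (rest : List String) (hrest : ∀ x, x ∈ rest → x ∈ char_list) acc,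
        nrGoA prefix_ char_list n rest hrest acc
          = acc ++ (rest.filter (fun letter => !PySem.Str.isIn letter prefix_)).flatMap
              (fun letter => nrComps char_list n (prefix_ ++ letter)) := by
      intro rest
      induction rest with
      | nil => intro hrest acc; rw [nrGoA]; simp
      | cons letter ls ihr =>
        intro hrest acc
        rw [nrGoA]
        by_cases h : PySem.Str.isIn letter prefix_ = true
        · have h' : PySem.Chars.isIn letter.toList prefix_.toList = true := by simpa using h
          rw [dif_pos h]
          rw [ihr]
          simp [h']
        · have h' : PySem.Chars.isIn letter.toList prefix_.toList = false := by
            simpa using Bool.eq_false_iff.mpr h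
          rw [dif_neg h]
          have hlt : nrFree char_list (prefix_ ++ letter) < fc := by
            rw [← hfc]
            exact nrFree_lt char_list prefix_ letter (hrest letter List.mem_cons_self)
              (Bool.eq_false_iff.mpr h)
          have hA := (ih _ hlt (prefix_ ++ letter) rfl).1
          rw [ihr, hA]
          simp [h', List.append_assoc]
    refine ⟨?_, goA⟩
    intro acc
    rw [no_repetition_list_with_prefix, nrComps]
    by_cases hn : (prefix_.length : Int) = n
    · have hn' : PySem.Str.len prefix_ = n := by simpa [PySem.Str.len] using hn
      simp [hn]
    · have hn' : ¬ PySem.Str.len prefix_ = n := by simpa [PySem.Str.len] using hn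
      rw [if_neg hn', if_neg hn', goA char_list (fun _ h => h) acc]
      simp

-- one step of nrComps without attach
theorem nrComps_unfold_ne (char_list : List String) (n : Int) (p : String)
    (hn : ¬ PySem.Str.len p = n) :
    nrComps char_list n p
      = (char_list.filter (fun letter => !PySem.Str.isIn letter p)).flatMap
          (fun letter => nrComps char_list n (p ++ letter)) := by
  rw [nrComps, if_neg hn]
  simp

-- B's stack loop flushes the pure completion lists of the pending prefixes, in order
theorem nrLoop_eq (char_list : List String) (n : Int) :
    ∀ (m : Nat) (stack : List String), nrStackMeasure char_list stack = m →
      ∀ out, nrLoop char_list n stack out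
        = out ++ stack.flatMap (nrComps char_list n) := by
  intro m
  induction m using Nat.strong_induction_on with
  | _ m ih =>
    intro stack hm out
    match stack with
    | [] => rw [nrLoop]; simp
    | p :: rest =>
      rw [nrLoop]
      by_cases hn : PySem.Str.len p = n
      · have hlt : nrStackMeasure char_list rest < m := by
          rw [← hm]
          simp only [nrStackMeasure, List.map_cons, List.sum_cons]
          have : 0 < (char_list.length + 1) ^ (nrFree char_list p + 1) :=
            Nat.pow_pos (Nat.succ_pos _)
          omega
        rw [if_pos hn, ih _ hlt rest rfl]
        have hp : nrComps char_list n p = [p] := by rw [nrComps, if_pos hn]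
        simp [hp]
      · have hlt : nrStackMeasure char_list
            ((char_list.filter (fun l => !PySem.Str.isIn l p)).map (fun l => p ++ l) ++ rest) < m := by
          rw [← hm]
          simp only [nrStackMeasure, List.map_cons, List.sum_cons, List.map_append, List.sum_append]
          have := nrStackMeasure_children_lt char_list p
          unfold nrStackMeasure at this
          omega
        rw [if_neg hn, ih _ hlt _ rfl]
        rw [List.flatMap_cons, List.flatMap_append, nrComps_unfold_ne char_list n p hn]
        simp [List.flatMap_map]

-- ===== VERDICT (by name: the statement is the Claim_ definition above) =====
theorem no_repetition_list_with_prefix_spec : Claim_equal_no_repetition_list_with_prefix := by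
  intro prefix_ char_list n no_repetition_list _
  unfold Spec_no_repetition_list_with_prefix no_repetition_list_with_prefix_alt
  rw [nrLoop_eq char_list n _ [prefix_] rfl no_repetition_list]
  rw [(nrA_eq_append (nrFree char_list prefix_) char_list n prefix_ rfl).1 no_repetition_list]
  simp
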